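-- pv_equiv track=rewrite | github.com/mastotron/mastotron | mastotron/utils.py | parse_account_name
-- ===== SOURCE A (Python) =====
-- def parse_account_name(acct):
--     un, server = '', ''
--     acct = acct.strip()
--
--     if acct and '@' in acct:
--         if acct.startswith('@'):
--             return parse_account_name(acct[1:])
--
--         elif acct.count('@')>1:
--             return parse_account_name(acct.split('/@',1)[-1])
--
--         elif acct.startswith('http'):
--             server, un = acct.split('/@')
--             un = un.split('/')[0]
--             server = server.split('://',1)[-1].split('/')[0]
--
--         elif acct.count('@')==1:
--             un, server = acct.split('@',1)
--             server = server.split('/')[0]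
--
--     return un,server
-- ===== SOURCE B (Python) =====
-- def parse_account_name(acct):
--     # Iterative normalization (no recursion) + find/slice instead of split lists.
--     s = acct.strip().lstrip('@ \t\n\r')
--     while s.count('@') > 1:
--         j = s.find('/@')
--         if j < 0:
--             return '', ''   # A never returns on these inputs (unbounded self-recursion)
--         s = s[j + 2:].strip().lstrip('@ \t\n\r')
--     i = s.find('@')
--     if i < 0:
--         return '', ''
--     j = s.find('/@')
--     if s.startswith('http') and j >= 0:
--         un = s[j + 2:]
--         k = un.find('/')
--         if k >= 0:
--             un = un[:k]
--         head = s[:j]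
--         p = head.find('://')
--         host = head[p + 3:] if p >= 0 else head
--         q = host.find('/')
--         if q >= 0:
--             host = host[:q]
--         return un, host
--     un, server = s[:i], s[i + 1:]
--     k = server.find('/')
--     if k >= 0:
--         server = server[:k]
--     return un, server
-- ===== Notes on version B (the rewrite author's own statement) =====
-- stated objective: alternative
-- what changed: A's three-way tail recursion (re-strip, drop one leading '@', or re-split on '/@') becomes a single iterative normalization loop over one string variable plus a non-recursive find/slice terminal classification; no recursion and no list-building splits.
-- outside the precondition, e.g. on parse_account_name('http@x'): A raises ValueError, B returns ('http', 'x'); on parse_account_name('a@b@c'): A raises RecursionError, B returns ('', '')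
import Mathlib
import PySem

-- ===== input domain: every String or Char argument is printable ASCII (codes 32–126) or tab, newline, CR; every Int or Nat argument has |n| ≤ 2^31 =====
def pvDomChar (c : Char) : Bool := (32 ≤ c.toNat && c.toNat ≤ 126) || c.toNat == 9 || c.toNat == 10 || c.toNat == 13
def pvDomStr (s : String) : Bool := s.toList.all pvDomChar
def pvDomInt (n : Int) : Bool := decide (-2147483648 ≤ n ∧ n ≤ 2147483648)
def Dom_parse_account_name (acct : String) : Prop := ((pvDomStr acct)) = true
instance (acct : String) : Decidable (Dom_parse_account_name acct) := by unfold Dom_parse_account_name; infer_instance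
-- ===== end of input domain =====

-- B replaces A's three-way tail recursion by one iterative normalization loop plus a
-- non-recursive find/slice terminal classification (objective: alternative decomposition).

-- ===== PORT A =====
-- Literal port of A.  Python's self-recursion is realized with a fuel counter
-- (fuel = length + 1); the fuel-0 branch is only reachable where the Python
-- diverges (RecursionError), and the ("","") fallbacks of the two match arms
-- are Python's ValueError paths (tuple unpacking of split); all of those
-- inputs are excluded by Pre_.
def parse_account_name.go : Nat → String → String × String
  | 0, _ => ("", "")
  | fuel+1, acct0 =>
    let acct := PySem.Str.strip acct0
    if ¬ acct = "" ∧ PySem.Str.isIn "@" acct = true then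
      if PySem.Str.startswith acct "@" = true then
        parse_account_name.go fuel (PySem.Str.slice acct (some 1) none)
      else if PySem.Str.count acct "@" > 1 then
        parse_account_name.go fuel
          ((PySem.List.pyGet? ((PySem.Str.splitMax? acct "/@" 1).getD []) (-1)).getD "")
      else if PySem.Str.startswith acct "http" = true then
        match (PySem.Str.split? acct "/@").getD [] with
        | [server, un] =>
          let un := (PySem.List.pyGet? ((PySem.Str.split? un "/").getD []) 0).getD ""
          let server := (PySem.List.pyGet? ((PySem.Str.splitMax? server "://" 1).getD []) (-1)).getD ""
          let server := (PySem.List.pyGet? ((PySem.Str.split? server "/").getD []) 0).getD ""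
          (un, server)
        | _ => ("", "")          -- Python raises ValueError here (unpacking); outside Pre_
      else if PySem.Str.count acct "@" = 1 then
        match (PySem.Str.splitMax? acct "@" 1).getD [] with
        | [un, server] =>
          (un, (PySem.List.pyGet? ((PySem.Str.split? server "/").getD []) 0).getD "")
        | _ => ("", "")          -- unreachable: split('@',1) with '@' present yields 2 parts
      else ("", "")
    else ("", "")

def parse_account_name (acct : String) : String × String :=
  parse_account_name.go (acct.toList.length + 1) acct

-- ===== PORT B =====
-- Port of B (Source B).  s.strip().lstrip('@ \t\n\r') is ported exactly as strip followed by
-- dropWhile over that char set (Python lstrip with an explicit set); the while loop is the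
-- tail-recursive `loop` (fuel = length + 1; each iteration shortens the string by ≥ 2,
-- so fuel never runs out); the terminal code is Source B's find/slice code.
def parse_account_name_alt.norm (s : String) : String :=
  String.ofList ((PySem.Str.strip s).toList.dropWhile (fun c => c ∈ ['@', ' ', '\t', '\n', '\r']))

def parse_account_name_alt.terminal (s : String) : String × String :=
  let i := PySem.Str.find s "@"
  if i < 0 then ("", "")
  else
    let j := PySem.Str.find s "/@"
    if PySem.Str.startswith s "http" = true ∧ j ≥ 0 then
      let un0 := PySem.Str.slice s (some (j + 2)) none
      let k := PySem.Str.find un0 "/"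
      let un := if k ≥ 0 then PySem.Str.slice un0 none (some k) else un0
      let head := PySem.Str.slice s none (some j)
      let p := PySem.Str.find head "://"
      let host0 := if p ≥ 0 then PySem.Str.slice head (some (p + 3)) none else head
      let q := PySem.Str.find host0 "/"
      let host := if q ≥ 0 then PySem.Str.slice host0 none (some q) else host0
      (un, host)
    else
      let un := PySem.Str.slice s none (some i)
      let server0 := PySem.Str.slice s (some (i + 1)) none
      let k := PySem.Str.find server0 "/"
      (un, if k ≥ 0 then PySem.Str.slice server0 none (some k) else server0)

def parse_account_name_alt.loop : Nat → String → String × String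
  | 0, _ => ("", "")
  | fuel+1, s =>
    if PySem.Str.count s "@" > 1 then
      let j := PySem.Str.find s "/@"
      if j < 0 then ("", "")
      else parse_account_name_alt.loop fuel
             (parse_account_name_alt.norm (PySem.Str.slice s (some (j + 2)) none))
    else parse_account_name_alt.terminal s

def parse_account_name_alt (acct : String) : String × String :=
  parse_account_name_alt.loop (acct.toList.length + 1) (parse_account_name_alt.norm acct)

-- ===== PRECONDITION & SPEC =====
-- Helper vocabulary for Pre_ (closed-form, independent of both ports):
-- pvDws  = the string with its leading run of '@'/whitespace removed;
-- pvOcc  = "'/@' occurs at position i";  pvTail = what remains after jumping past that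
-- occurrence and removing the new leading '@'/whitespace run;
-- pvBad  = the shape ('@' present, 'http' prefix, no '/@') on which A's
-- `server, un = acct.split('/@')` unpacking raises ValueError.
abbrev pvDws (l : List Char) : List Char := l.dropWhile (fun c => c ∈ ['@', ' ', '\t', '\n', '\r'])
abbrev pvOcc (L : List Char) (i : Nat) : Prop := ['/', '@'] <+: L.drop i
abbrev pvTail (L : List Char) (i : Nat) : List Char := pvDws (L.drop (i + 2))
abbrev pvBad (T : List Char) : Prop := '@' ∈ T ∧ "http".toList <+: T ∧ ¬ ("/@".toList <:+: T)
abbrev pvPreL (L : List Char) : Prop :=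
  (L.count '@' ≤ 1 ∧ ¬ pvBad L)
  ∨ (2 ≤ L.count '@' ∧
      ∃ i < L.length, pvOcc L i ∧ (pvTail L i).count '@' ≤ 1 ∧
        (∀ i' < i, pvOcc L i' → 2 ≤ (pvTail L i').count '@') ∧ ¬ pvBad (pvTail L i))

-- Pre_ excludes exactly the inputs on which A raises: the pvBad terminal shape
-- (ValueError from unpacking acct.split('/@')) and the multi-'@' strings whose chain of
-- '/@'-jumps never reaches a state with ≤ 1 '@' (unbounded self-recursion, RecursionError).
-- On every input where A returns a value, Pre_ holds.
def Pre_parse_account_name (acct : String) : Prop :=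
  pvPreL (pvDws (PySem.Str.strip acct).toList)
instance (acct : String) : Decidable (Pre_parse_account_name acct) := by
  unfold Pre_parse_account_name; infer_instance
def pvWitness_parse_account_name : String := "user@server.com"

def Spec_parse_account_name (acct : String) (out : String × String) : Prop :=
  out = parse_account_name_alt acct
instance (acct : String) (out : String × String) : Decidable (Spec_parse_account_name acct out) := by
  unfold Spec_parse_account_name; infer_instance

-- ===== CLAIM (what is proved, stated in full; the proofs are below) =====
def Claim_equal_parse_account_name : Prop := ∀ (acct : String), Dom_parse_account_name acct → Pre_parse_account_name acct → Spec_parse_account_name acct (parse_account_name acct)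

-- ===== LEMMAS AND PROOFS =====

lemma pv_singleton_infix {c : Char} {l : List Char} : [c] <:+: l ↔ c ∈ l := by
  constructor
  · intro h; exact h.mem (List.mem_singleton_self c)
  · intro h
    obtain ⟨s, t, rfl⟩ := List.append_of_mem h
    exact ⟨s, t, by simp⟩

lemma pv_head_dropWhile {p : Char → Bool} {l : List Char} {c : Char} {r : List Char}
    (h : l.dropWhile p = c :: r) : p c = false := by
  induction l with
  | nil => simp at h
  | cons a l ih =>
    by_cases hp : p a
    · rw [List.dropWhile_cons_of_pos hp] at h; exact ih h
    · rw [List.dropWhile_cons_of_neg hp] at h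
      cases h; simpa using hp

-- splitOn.go: the accumulator only prepends
lemma pv_go_acc (sep : List Char) (fuel : Nat) :
    ∀ (l cur : List Char) (acc : List (List Char)),
      PySem.Chars.splitOn.go sep fuel l cur acc
        = acc.reverse ++ PySem.Chars.splitOn.go sep fuel l cur [] := by
  induction fuel with
  | zero => intro l cur acc; simp [PySem.Chars.splitOn.go]
  | succ n ih =>
    intro l cur acc
    cases l with
    | nil => simp [PySem.Chars.splitOn.go]
    | cons c rest =>
      rw [PySem.Chars.splitOn.go, PySem.Chars.splitOn.go]
      by_cases h : sep.isPrefixOf (c :: rest) = true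
      · simp only [h, if_true]
        rw [ih _ [] (cur.reverse :: acc), ih _ [] (cur.reverse :: [])]
        simp
      · simp only [h, if_false, Bool.false_eq_true]
        rw [ih rest (c :: cur) acc]

-- splitOn.go when the separator does not occur at all
lemma pv_go_noocc (sep : List Char) (fuel : Nat) :
    ∀ (l cur : List Char) (acc : List (List Char)), ¬ sep <:+: l →
      PySem.Chars.splitOn.go sep fuel l cur acc = ((cur.reverse ++ l) :: acc).reverse := by
  induction fuel with
  | zero => intro l cur acc _; simp [PySem.Chars.splitOn.go]
  | succ n ih =>
    intro l cur acc h
    cases l with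
    | nil => simp [PySem.Chars.splitOn.go]
    | cons c rest =>
      rw [PySem.Chars.splitOn.go]
      have hpre : sep.isPrefixOf (c :: rest) = false := by
        rw [Bool.eq_false_iff]
        intro hh
        exact h (List.IsPrefix.isInfix (List.isPrefixOf_iff_prefix.mp hh))
      simp only [hpre, if_false, Bool.false_eq_true]
      have hrest : ¬ sep <:+: rest := fun hh => h (hh.trans (List.suffix_cons c rest).isInfix)
      rw [ih rest (c :: cur) acc hrest]
      simp

-- splitOn.go consuming a separator-free prefix β and then the separator
lemma pv_go_first (sep : List Char) (hsep : sep ≠ []) :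
    ∀ (β v cur : List Char) (acc : List (List Char)) (fuel : Nat),
      (∀ i < β.length, ¬ sep <+: (β ++ sep ++ v).drop i) →
      β.length + sep.length + v.length < fuel →
      PySem.Chars.splitOn.go sep fuel (β ++ sep ++ v) cur acc
        = PySem.Chars.splitOn.go sep (fuel - β.length - 1) v [] ((cur.reverse ++ β) :: acc) := by
  intro β
  induction β with
  | nil =>
    intro v cur acc fuel _ hfuel
    cases fuel with
    | zero => omega
    | succ n =>
      cases sep with
      | nil => exact absurd rfl hsep
      | cons s0 srest =>
        rw [show (([] : List Char) ++ (s0 :: srest) ++ v) = s0 :: (srest ++ v) by simp,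
            PySem.Chars.splitOn.go]
        have hpre : (s0 :: srest).isPrefixOf (s0 :: (srest ++ v)) = true := by
          rw [List.isPrefixOf_iff_prefix]
          exact ⟨v, by simp⟩
        simp only [hpre, if_true]
        have hdrop : (s0 :: (srest ++ v)).drop (s0 :: srest).length = v := by
          rw [show (s0 :: (srest ++ v)) = (s0 :: srest) ++ v by simp]
          simp
        rw [hdrop]
        simp
  | cons b β' ih =>
    intro v cur acc fuel hno hfuel
    cases fuel with
    | zero => omega
    | succ n =>
      rw [show ((b :: β') ++ sep ++ v) = b :: (β' ++ sep ++ v) by simp,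
          PySem.Chars.splitOn.go]
      have hpre : sep.isPrefixOf (b :: (β' ++ sep ++ v)) = false := by
        rw [Bool.eq_false_iff]
        intro hh
        have h0 := hno 0 (by simp)
        simp only [List.drop_zero] at h0
        exact h0 (by simpa using List.isPrefixOf_iff_prefix.mp hh)
      simp only [hpre, if_false, Bool.false_eq_true]
      have hno' : ∀ i < β'.length, ¬ sep <+: (β' ++ sep ++ v).drop i := by
        intro i hi
        have := hno (i + 1) (by simp; omega)
        simpa using this
      rw [ih v (b :: cur) acc n hno' (by simp at hfuel ⊢; omega)]
      have harith : n - β'.length - 1 = n + 1 - (β'.length + 1) - 1 := by omega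
      simp [harith]

lemma pv_splitOn_noocc (sep l : List Char) (h : ¬ sep <:+: l) :
    PySem.Chars.splitOn l sep = [l] := by
  unfold PySem.Chars.splitOn
  rw [pv_go_noocc sep _ l [] [] h]
  simp

lemma pv_splitOn_two (sep β v : List Char) (hsep : sep ≠ [])
    (hno : ∀ i < β.length, ¬ sep <+: (β ++ sep ++ v).drop i)
    (hv : ¬ sep <:+: v) :
    PySem.Chars.splitOn (β ++ sep ++ v) sep = [β, v] := by
  unfold PySem.Chars.splitOn
  rw [pv_go_first sep hsep β v [] [] _ hno (by simp; omega)]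
  rw [pv_go_noocc sep _ v [] _ hv]
  simp

lemma pv_splitOn_head (sep β v : List Char) (hsep : sep ≠ [])
    (hno : ∀ i < β.length, ¬ sep <+: (β ++ sep ++ v).drop i) :
    ∃ rest, PySem.Chars.splitOn (β ++ sep ++ v) sep = β :: rest := by
  unfold PySem.Chars.splitOn
  rw [pv_go_first sep hsep β v [] [] _ hno (by simp; omega)]
  rw [pv_go_acc]
  exact ⟨_, rfl⟩

-- splitOnMax.go with exhausted budget
lemma pv_gomax_zero (sep : List Char) (fuel : Nat) (l cur : List Char) (acc : List (List Char)) :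
    PySem.Chars.splitOnMax.go sep fuel 0 l cur acc = ((cur.reverse ++ l) :: acc).reverse := by
  cases fuel with
  | zero => simp [PySem.Chars.splitOnMax.go]
  | succ n =>
    cases l with
    | nil => simp [PySem.Chars.splitOnMax.go]
    | cons c rest => simp [PySem.Chars.splitOnMax.go]

lemma pv_gomax_noocc (sep : List Char) (fuel : Nat) :
    ∀ (m : Nat) (l cur : List Char) (acc : List (List Char)), ¬ sep <:+: l →
      PySem.Chars.splitOnMax.go sep fuel m l cur acc = ((cur.reverse ++ l) :: acc).reverse := by
  induction fuel with
  | zero => intro m l cur acc _; simp [PySem.Chars.splitOnMax.go]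
  | succ n ih =>
    intro m l cur acc h
    cases l with
    | nil => simp [PySem.Chars.splitOnMax.go]
    | cons c rest =>
      rw [PySem.Chars.splitOnMax.go]
      by_cases hm : m = 0
      · simp [hm]
      · have hpre : sep.isPrefixOf (c :: rest) = false := by
          rw [Bool.eq_false_iff]
          intro hh
          exact h (List.IsPrefix.isInfix (List.isPrefixOf_iff_prefix.mp hh))
        simp only [hm, if_false, hpre, Bool.false_eq_true]
        have hrest : ¬ sep <:+: rest := fun hh => h (hh.trans (List.suffix_cons c rest).isInfix)
        rw [ih m rest (c :: cur) acc hrest]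
        simp

lemma pv_gomax_first (sep : List Char) (hsep : sep ≠ []) :
    ∀ (β v cur : List Char) (acc : List (List Char)) (fuel : Nat),
      (∀ i < β.length, ¬ sep <+: (β ++ sep ++ v).drop i) →
      β.length + sep.length + v.length < fuel →
      PySem.Chars.splitOnMax.go sep fuel 1 (β ++ sep ++ v) cur acc
        = acc.reverse ++ [cur.reverse ++ β, v] := by
  intro β
  induction β with
  | nil =>
    intro v cur acc fuel _ hfuel
    cases fuel with
    | zero => omega
    | succ n =>
      cases sep with
      | nil => exact absurd rfl hsep
      | cons s0 srest =>
        rw [show (([] : List Char) ++ (s0 :: srest) ++ v) = s0 :: (srest ++ v) by simp,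
            PySem.Chars.splitOnMax.go]
        have hpre : (s0 :: srest).isPrefixOf (s0 :: (srest ++ v)) = true := by
          rw [List.isPrefixOf_iff_prefix]
          exact ⟨v, by simp⟩
        simp only [hpre, if_true, one_ne_zero, if_false]
        have hdrop : (s0 :: (srest ++ v)).drop (s0 :: srest).length = v := by
          rw [show (s0 :: (srest ++ v)) = (s0 :: srest) ++ v by simp]
          simp
        rw [hdrop, pv_gomax_zero]
        simp
  | cons b β' ih =>
    intro v cur acc fuel hno hfuel
    cases fuel with
    | zero => omega
    | succ n =>
      rw [show ((b :: β') ++ sep ++ v) = b :: (β' ++ sep ++ v) by simp,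
          PySem.Chars.splitOnMax.go]
      have hpre : sep.isPrefixOf (b :: (β' ++ sep ++ v)) = false := by
        rw [Bool.eq_false_iff]
        intro hh
        have h0 := hno 0 (by simp)
        simp only [List.drop_zero] at h0
        exact h0 (by simpa using List.isPrefixOf_iff_prefix.mp hh)
      simp only [hpre, if_false, one_ne_zero, Bool.false_eq_true]
      have hno' : ∀ i < β'.length, ¬ sep <+: (β' ++ sep ++ v).drop i := by
        intro i hi
        have := hno (i + 1) (by simp; omega)
        simpa using this
      rw [ih v (b :: cur) acc n hno' (by simp at hfuel ⊢; omega)]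
      simp

lemma pv_splitOnMax_noocc (sep l : List Char) (h : ¬ sep <:+: l) :
    PySem.Chars.splitOnMax l sep 1 = [l] := by
  unfold PySem.Chars.splitOnMax
  rw [if_neg (by omega)]
  rw [pv_gomax_noocc sep _ _ l [] [] h]
  simp

lemma pv_splitOnMax_two (sep β v : List Char) (hsep : sep ≠ [])
    (hno : ∀ i < β.length, ¬ sep <+: (β ++ sep ++ v).drop i) :
    PySem.Chars.splitOnMax (β ++ sep ++ v) sep 1 = [β, v] := by
  unfold PySem.Chars.splitOnMax
  rw [if_neg (by omega)]
  rw [show ((1 : Int).toNat) = 1 from rfl]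
  rw [pv_gomax_first sep hsep β v [] [] _ hno (by simp; omega)]
  simp

-- Chars.count with a single-char pattern is List.count
lemma pv_countgo_single (c : Char) :
    ∀ (l : List Char) (fuel acc : Nat), l.length ≤ fuel →
      PySem.Chars.count.go [c] fuel l acc = acc + l.count c := by
  intro l
  induction l with
  | nil => intro fuel acc _; cases fuel <;> simp [PySem.Chars.count.go]
  | cons a rest ih =>
    intro fuel acc hf
    cases fuel with
    | zero => simp at hf
    | succ n =>
      rw [PySem.Chars.count.go]
      by_cases h : c = a
      · subst h
        have hp : ([c] : List Char).isPrefixOf (c :: rest) = true := by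
          simp [List.isPrefixOf]
        simp only [hp, if_true]
        rw [show (c :: rest).drop ([c] : List Char).length = rest from rfl]
        rw [ih n (acc + 1) (by simp only [List.length_cons] at hf; omega)]
        simp
        omega
      · have hp : ([c] : List Char).isPrefixOf (a :: rest) = false := by
          simp [List.isPrefixOf]
          exact fun hh => absurd hh h
        simp only [hp, if_false, Bool.false_eq_true]
        rw [ih n acc (by simp only [List.length_cons] at hf; omega)]
        simp [List.count_cons]
        intro hh
        exact absurd hh.symm h

lemma pv_count_single (l : List Char) (c : Char) :
    PySem.Chars.count l [c] = l.count c := by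
  unfold PySem.Chars.count
  rw [if_neg (by simp)]
  rw [pv_countgo_single c l l.length 0 le_rfl]
  omega

-- find gives a decomposition at the first occurrence
lemma pv_find_decomp (s sub : List Char) (hsub : sub ≠ [])
    (h : 0 ≤ PySem.Chars.find s sub) :
    s = s.take (PySem.Chars.find s sub).toNat ++ sub
          ++ s.drop ((PySem.Chars.find s sub).toNat + sub.length)
    ∧ (s.take (PySem.Chars.find s sub).toNat).length = (PySem.Chars.find s sub).toNat
    ∧ (∀ i < (PySem.Chars.find s sub).toNat, ¬ sub <+: s.drop i) := by
  obtain ⟨hpre, hmin⟩ := PySem.Chars.find_spec h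
  obtain ⟨r, hr⟩ := hpre
  have hflen : (PySem.Chars.find s sub).toNat < s.length := by
    by_contra hc
    rw [List.drop_eq_nil_of_le (Nat.le_of_not_lt hc)] at hr
    rcases List.append_eq_nil_iff.mp hr with ⟨h1, _⟩
    exact hsub h1
  have hdrop2 : s.drop ((PySem.Chars.find s sub).toNat + sub.length) = r := by
    have h1 : (s.drop (PySem.Chars.find s sub).toNat).drop sub.length = r := by
      rw [← hr]; simp
    rw [← h1, List.drop_drop]
  refine ⟨?_, by simp; omega, hmin⟩
  calc s = s.take (PySem.Chars.find s sub).toNat ++ s.drop (PySem.Chars.find s sub).toNat := by simp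
    _ = s.take (PySem.Chars.find s sub).toNat ++ (sub ++ r) := by rw [← hr]
    _ = _ := by rw [hdrop2]; simp

-- dropWhile over a superset predicate absorbs an inner dropWhile
lemma pv_dropWhile_dropWhile (p q : Char → Bool) (l : List Char)
    (h : ∀ c ∈ l, q c = true → p c = true) :
    (l.dropWhile q).dropWhile p = l.dropWhile p := by
  induction l with
  | nil => simp
  | cons a rest ih =>
    by_cases hq : q a = true
    · rw [List.dropWhile_cons_of_pos hq, List.dropWhile_cons_of_pos (h a (by simp) hq)]
      exact ih (fun c hc => h c (by simp [hc]))
    · rw [List.dropWhile_cons_of_neg (by simp [hq])]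

-- rstrip is the identity when the last char is not a space
lemma pv_rstrip_eq_self (l : List Char)
    (h : ∀ c, l.getLast? = some c → PySem.Chars.isspace c = false) :
    PySem.Chars.rstrip l = l := by
  unfold PySem.Chars.rstrip
  cases hl : l.reverse with
  | nil => simp [List.reverse_eq_nil_iff.mp hl]
  | cons a rest =>
    have ha : PySem.Chars.isspace a = false := by
      apply h
      rw [← List.head?_reverse, hl]
      rfl
    rw [List.dropWhile_cons_of_neg (by simp [ha]), ← hl, List.reverse_reverse]

-- a domain character that is a Python space is one of ' ', '\t', '\n', '\r'
lemma pv_dom_space (c : Char) (hdom : pvDomChar c = true)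
    (hs : PySem.Chars.isspace c = true) : c ∈ [' ', '\t', '\n', '\r'] := by
  have hn : c.toNat = 32 ∨ c.toNat = 9 ∨ c.toNat = 10 ∨ c.toNat = 13 := by
    unfold pvDomChar at hdom
    unfold PySem.Chars.isspace at hs
    simp at hdom hs
    omega
  have hofn : Char.ofNat c.toNat = c := Char.ofNat_toNat c
  rcases hn with h | h | h | h <;> rw [h] at hofn <;> simp [← hofn]

lemma pv_strip_head_not_space (l : List Char) (c : Char) (r : List Char)
    (h : PySem.Chars.strip l = c :: r) : PySem.Chars.isspace c = false := by
  unfold PySem.Chars.strip at h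
  have hpre : PySem.Chars.rstrip (PySem.Chars.lstrip l) <+: PySem.Chars.lstrip l := by
    unfold PySem.Chars.rstrip
    rw [← List.reverse_suffix]
    simp [List.dropWhile_suffix]
  rw [h] at hpre
  obtain ⟨tail, htail⟩ := hpre
  unfold PySem.Chars.lstrip at htail
  exact pv_head_dropWhile (p := PySem.Chars.isspace) htail.symm

lemma pv_strip_last_not_space (l : List Char) :
    ∀ c, (PySem.Chars.strip l).getLast? = some c → PySem.Chars.isspace c = false := by
  intro c hc
  unfold PySem.Chars.strip PySem.Chars.rstrip at hc
  rw [List.getLast?_reverse] at hc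
  cases hh : (PySem.Chars.lstrip l).reverse.dropWhile PySem.Chars.isspace with
  | nil => rw [hh] at hc; simp at hc
  | cons a rest =>
    rw [hh] at hc
    simp at hc
    subst hc
    exact pv_head_dropWhile hh

lemma pv_strip_sublist (l : List Char) : (PySem.Chars.strip l).Sublist l := by
  have h1 : (PySem.Chars.lstrip l).Sublist l := List.dropWhile_sublist _
  have h2 : (PySem.Chars.rstrip (PySem.Chars.lstrip l)).Sublist (PySem.Chars.lstrip l) := by
    unfold PySem.Chars.rstrip
    have h3 := (List.dropWhile_sublist (l := (PySem.Chars.lstrip l).reverse)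
      (p := PySem.Chars.isspace)).reverse
    simpa using h3
  exact h2.trans h1

lemma pv_getLast?_append {α : Type} (p l : List α) (h : l ≠ []) :
    (p ++ l).getLast? = l.getLast? := by
  induction p with
  | nil => rfl
  | cons a p ih =>
    have h2 : p ++ l ≠ [] := fun hh => h (List.append_eq_nil_iff.mp hh).2
    obtain ⟨y, ys, hys⟩ := List.exists_cons_of_ne_nil h2
    rw [List.cons_append, hys, List.getLast?_cons_cons, ← hys, ih]

-- B's lstrip char set: characters outside it
lemma pv_not_mem_set (c : Char) (h1 : c ≠ '@') (h2 : PySem.Chars.isspace c = false) :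
    ¬ (c ∈ ['@', ' ', '\t', '\n', '\r']) := by
  intro h
  fin_cases h
  · exact h1 rfl
  all_goals revert h2; decide

lemma pv_mem_set_of_space (c : Char) (hdom : pvDomChar c = true)
    (hs : PySem.Chars.isspace c = true) : c ∈ ['@', ' ', '\t', '\n', '\r'] := by
  have := pv_dom_space c hdom hs
  simp only [List.mem_cons] at this ⊢
  tauto

-- re-stripping a suffix of an already-stripped string changes nothing under pvDws
lemma pv_norm_suffix (x : List Char) (r : List Char)
    (hsuf : r <:+ PySem.Chars.strip x) (hdom : ∀ d ∈ r, pvDomChar d = true) :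
    (PySem.Chars.strip r).dropWhile (fun c => c ∈ ['@', ' ', '\t', '\n', '\r'])
      = r.dropWhile (fun c => c ∈ ['@', ' ', '\t', '\n', '\r']) := by
  cases hr : PySem.Chars.lstrip r with
  | nil =>
    have hall : ∀ d ∈ r, PySem.Chars.isspace d = true := by
      have := List.dropWhile_eq_nil_iff.mp hr
      intro d hd
      exact this d hd
    have hrhs : r.dropWhile (fun c => c ∈ ['@', ' ', '\t', '\n', '\r']) = [] := by
      apply List.dropWhile_eq_nil_iff.mpr
      intro d hd
      simpa using pv_mem_set_of_space d (hdom d hd) (hall d hd)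
    have hlhs : PySem.Chars.strip r = [] := by
      unfold PySem.Chars.strip
      rw [hr]
      decide
    rw [hlhs, hrhs]
    rfl
  | cons d w =>
    have hr_ne : r ≠ [] := by
      intro hh
      rw [hh] at hr
      simp [PySem.Chars.lstrip] at hr
    have hlast_r : ∀ e, r.getLast? = some e → PySem.Chars.isspace e = false := by
      intro e he
      apply pv_strip_last_not_space x e
      obtain ⟨pre, hpre⟩ := hsuf
      rw [← hpre, pv_getLast?_append _ _ hr_ne]
      exact he
    have hlast_lr : ∀ e, (PySem.Chars.lstrip r).getLast? = some e →
        PySem.Chars.isspace e = false := by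
      intro e he
      apply hlast_r
      obtain ⟨pre, hpre⟩ := List.dropWhile_suffix (p := PySem.Chars.isspace) (l := r)
      have hne2 : List.dropWhile PySem.Chars.isspace r ≠ [] := by
        rw [show List.dropWhile PySem.Chars.isspace r = PySem.Chars.lstrip r from rfl, hr]
        simp
      rw [← hpre, pv_getLast?_append _ _ hne2]
      rw [show List.dropWhile PySem.Chars.isspace r = PySem.Chars.lstrip r from rfl]
      exact he
    have hstr : PySem.Chars.strip r = PySem.Chars.lstrip r := by
      unfold PySem.Chars.strip
      exact pv_rstrip_eq_self _ hlast_lr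
    rw [hstr]
    unfold PySem.Chars.lstrip
    apply pv_dropWhile_dropWhile
    intro e he hsp
    simpa using pv_mem_set_of_space e (hdom e he) hsp

-- dropWhile as a drop
lemma pv_dropWhile_eq_drop (p : Char → Bool) (l : List Char) :
    l.dropWhile p = l.drop (l.takeWhile p).length := by
  induction l with
  | nil => simp
  | cons a t ih =>
    by_cases h : p a
    · rw [List.dropWhile_cons_of_pos h, List.takeWhile_cons_of_pos h]
      simpa using ih
    · rw [List.dropWhile_cons_of_neg (by simpa using h), List.takeWhile_cons_of_neg (by simpa using h)]
      simp

-- a position strictly inside the takeWhile prefix starts with a p-character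
lemma pv_drop_head_pred (p : Char → Bool) :
    ∀ (l : List Char) (q : Nat), q < (l.takeWhile p).length →
      ∀ c rest, l.drop q = c :: rest → p c = true := by
  intro l
  induction l with
  | nil => simp
  | cons a t ih =>
    intro q hq c rest h
    by_cases hp : p a
    · cases q with
      | zero =>
        simp only [List.drop_zero] at h
        cases h
        exact hp
      | succ q' =>
        rw [List.takeWhile_cons_of_pos hp] at hq
        simp only [List.length_cons] at hq
        exact ih q' (by omega) c rest (by simpa using h)
    · rw [List.takeWhile_cons_of_neg (by simpa using hp)] at hq
      simp at hq

lemma pv_prefix2 (u : List Char) : (['/', '@'] <+: u) ↔ ∃ t, u = '/' :: '@' :: t := by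
  constructor
  · rintro ⟨t, ht⟩; exact ⟨t, ht.symm⟩
  · rintro ⟨t, rfl⟩; exact ⟨t, rfl⟩

-- Pre_ transfers across one '/@'-jump (j = the first occurrence)
lemma pv_pre_step (L : List Char) (j : Nat)
    (hj : pvOcc L j) (hjmin : ∀ p < j, ¬ pvOcc L p)
    (h2 : 2 ≤ L.count '@') (hpre : pvPreL L) :
    pvPreL (pvTail L j) := by
  rcases hpre with ⟨h1, _⟩ | ⟨-, i, hilen, hocc, htc, hmin, hbad⟩
  · omega
  have hij : j ≤ i := by
    by_contra h
    exact hjmin i (by omega) hocc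
  rcases Nat.eq_or_lt_of_le hij with rfl | hlt
  · exact Or.inl ⟨htc, hbad⟩
  have htail2 : 2 ≤ (pvTail L j).count '@' := hmin j hlt hj
  have hLd : pvTail L j
      = (L.drop (j + 2)).drop (((L.drop (j + 2)).takeWhile
          (fun c => c ∈ ['@', ' ', '\t', '\n', '\r'])).length) := by
    show pvDws (L.drop (j + 2)) = _
    exact pv_dropWhile_eq_drop _ _
  set d := ((L.drop (j + 2)).takeWhile (fun c => c ∈ ['@', ' ', '\t', '\n', '\r'])).length with hd
  have hi2 : j + 2 ≤ i := by
    rcases Nat.lt_or_ge i (j + 2) with h | h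
    · have hi1 : i = j + 1 := by omega
      obtain ⟨t, ht⟩ := pv_prefix2 _ |>.mp hj
      obtain ⟨t', ht'⟩ := pv_prefix2 _ |>.mp hocc
      have : L.drop i = '@' :: t := by
        rw [hi1, show j + 1 = j + 1 from rfl]
        have := congrArg (List.drop 1) ht
        rw [List.drop_drop] at this
        simpa [Nat.add_comm] using this
      rw [this] at ht'
      simp at ht'
    · exact h
  have hdi : j + 2 + d ≤ i := by
    by_contra hcon
    have hq : i - (j + 2) < d := by omega
    obtain ⟨t, ht⟩ := pv_prefix2 _ |>.mp hocc
    have hMd : (L.drop (j + 2)).drop (i - (j + 2)) = '/' :: '@' :: t := by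
      rw [List.drop_drop, show j + 2 + (i - (j + 2)) = i by omega, ht]
    have := pv_drop_head_pred _ (L.drop (j + 2)) (i - (j + 2)) hq '/' ('@' :: t) hMd
    simp at this
  set i₂ := i - (j + 2) - d with hi₂
  have hdropEq : ∀ p : Nat, (pvTail L j).drop p = L.drop (j + 2 + d + p) := by
    intro p
    rw [hLd, List.drop_drop, List.drop_drop]
    congr 1
    omega
  have hieq : j + 2 + d + i₂ = i := by omega
  have hoccT : pvOcc (pvTail L j) i₂ := by
    show ['/', '@'] <+: (pvTail L j).drop i₂
    rw [hdropEq, hieq]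
    exact hocc
  have htailEq : pvTail (pvTail L j) i₂ = pvTail L i := by
    show pvDws ((pvTail L j).drop (i₂ + 2)) = pvDws (L.drop (i + 2))
    rw [hdropEq]
    congr 2
    omega
  refine Or.inr ⟨htail2, i₂, ?_, hoccT, ?_, ?_, ?_⟩
  · by_contra hc
    have : (pvTail L j).drop i₂ = [] := List.drop_eq_nil_of_le (by omega)
    obtain ⟨t, ht⟩ := pv_prefix2 _ |>.mp hoccT
    rw [ht] at this
    simp at this
  · rw [htailEq]; exact htc
  · intro p hp hoccp
    have hoccL : pvOcc L (j + 2 + d + p) := by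
      show ['/', '@'] <+: L.drop (j + 2 + d + p)
      rw [← hdropEq]
      exact hoccp
    have := hmin (j + 2 + d + p) (by omega) hoccL
    have htEq : pvTail (pvTail L j) p = pvTail L (j + 2 + d + p) := by
      show pvDws ((pvTail L j).drop (p + 2)) = pvDws (L.drop (j + 2 + d + p + 2))
      rw [hdropEq, show j + 2 + d + (p + 2) = j + 2 + d + p + 2 from by omega]
    rw [htEq]
    exact this
  · rw [htailEq]; exact hbad

-- first chunk of a '/'-split, as B computes it
lemma pv_first_chunk (u : String) :
    (PySem.List.pyGet? ((PySem.Str.split? u "/").getD []) 0).getD ""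
      = if PySem.Str.find u "/" ≥ 0
        then PySem.Str.slice u none (some (PySem.Str.find u "/"))
        else u := by
  have hsep : ("/" : String).toList = ['/'] := rfl
  by_cases h : PySem.Str.find u "/" ≥ 0
  · rw [if_pos h]
    have h' : 0 ≤ PySem.Chars.find u.toList ['/'] := by
      rw [PySem.Str.find_eq, hsep] at h; exact h
    obtain ⟨heq, hlen, hmin⟩ := pv_find_decomp u.toList ['/'] (by simp) h'
    simp only [List.length_cons, List.length_nil] at heq
    obtain ⟨rest, hsplit⟩ := pv_splitOn_head ['/']
      (u.toList.take (PySem.Chars.find u.toList ['/']).toNat)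
      (u.toList.drop ((PySem.Chars.find u.toList ['/']).toNat + 1))
      (by simp)
      (by rw [← heq]; intro i hi; rw [hlen] at hi; exact hmin i hi)
    rw [← heq] at hsplit
    have hA : PySem.Str.split? u "/"
        = some (List.map String.ofList (PySem.Chars.splitOn u.toList ['/'])) := by
      unfold PySem.Str.split? PySem.Chars.split?
      rw [hsep, if_neg (by simp)]
      rfl
    rw [hA, Option.getD_some, hsplit]
    simp only [List.map_cons]
    rw [show ((0 : Int) = ((0 : Nat) : Int)) from rfl, PySem.List.pyGet?_natCast]
    simp only [List.getElem?_cons_zero, Option.getD_some]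
    unfold PySem.Str.slice
    rw [PySem.Chars.slice_eq_listSlice]
    rw [show PySem.Str.find u "/" = ((PySem.Chars.find u.toList ['/']).toNat : Int) by
      rw [PySem.Str.find_eq, hsep, Int.toNat_of_nonneg h']]
    rw [PySem.List.slice_to_natCast]
  · rw [if_neg h]
    have h1 : PySem.Chars.find u.toList ['/'] = -1 := by
      have h2 := PySem.Chars.neg_one_le_find u.toList ['/']
      rw [PySem.Str.find_eq, hsep] at h
      omega
    have hno : ¬ (['/'] <:+: u.toList) := (PySem.Chars.find_eq_neg_one_iff _ _).mp h1
    have hA : PySem.Str.split? u "/"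
        = some [String.ofList u.toList] := by
      unfold PySem.Str.split? PySem.Chars.split?
      rw [hsep, if_neg (by simp), pv_splitOn_noocc _ _ hno]
      rfl
    rw [hA, Option.getD_some]
    rw [show ((0 : Int) = ((0 : Nat) : Int)) from rfl, PySem.List.pyGet?_natCast]
    simp [String.ofList_toList]

-- last chunk of a '://'-maxsplit-1, as B computes it
lemma pv_after_sep (u : String) :
    (PySem.List.pyGet? ((PySem.Str.splitMax? u "://" 1).getD []) (-1)).getD ""
      = if PySem.Str.find u "://" ≥ 0
        then PySem.Str.slice u (some (PySem.Str.find u "://" + 3)) none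
        else u := by
  have hsep : ("://" : String).toList = [':', '/', '/'] := rfl
  by_cases h : PySem.Str.find u "://" ≥ 0
  · rw [if_pos h]
    have h' : 0 ≤ PySem.Chars.find u.toList [':', '/', '/'] := by
      rw [PySem.Str.find_eq, hsep] at h; exact h
    obtain ⟨heq, hlen, hmin⟩ := pv_find_decomp u.toList [':', '/', '/'] (by simp) h'
    simp only [List.length_cons, List.length_nil] at heq
    have hsplit := pv_splitOnMax_two [':', '/', '/']
      (u.toList.take (PySem.Chars.find u.toList [':', '/', '/']).toNat)
      (u.toList.drop ((PySem.Chars.find u.toList [':', '/', '/']).toNat + 3))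
      (by simp)
      (by rw [← heq]; intro i hi; rw [hlen] at hi; exact hmin i hi)
    rw [← heq] at hsplit
    have hA : PySem.Str.splitMax? u "://" 1
        = some (List.map String.ofList (PySem.Chars.splitOnMax u.toList [':', '/', '/'] 1)) := by
      unfold PySem.Str.splitMax? PySem.Chars.splitMax?
      rw [hsep, if_neg (by simp)]
      rfl
    rw [hA, Option.getD_some, hsplit]
    simp only [List.map_cons, List.map_nil]
    rw [show PySem.List.pyGet?
        [String.ofList (u.toList.take (PySem.Chars.find u.toList [':', '/', '/']).toNat),
         String.ofList (u.toList.drop ((PySem.Chars.find u.toList [':', '/', '/']).toNat + 3))]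
        (-1)
      = some (String.ofList (u.toList.drop ((PySem.Chars.find u.toList [':', '/', '/']).toNat + 3)))
      by simp [PySem.List.pyGet?, PySem.List.pyIdx?]]
    simp only [Option.getD_some]
    unfold PySem.Str.slice
    rw [PySem.Chars.slice_eq_listSlice]
    rw [show PySem.Str.find u "://" + 3
        = (((PySem.Chars.find u.toList [':', '/', '/']).toNat + 3 : Nat) : Int) by
      rw [PySem.Str.find_eq, hsep]
      push_cast
      rw [Int.toNat_of_nonneg h']]
    rw [PySem.List.slice_from_natCast]
  · rw [if_neg h]
    have h1 : PySem.Chars.find u.toList [':', '/', '/'] = -1 := by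
      have h2 := PySem.Chars.neg_one_le_find u.toList [':', '/', '/']
      rw [PySem.Str.find_eq, hsep] at h
      omega
    have hno : ¬ ([':', '/', '/'] <:+: u.toList) := (PySem.Chars.find_eq_neg_one_iff _ _).mp h1
    have hA : PySem.Str.splitMax? u "://" 1 = some [String.ofList u.toList] := by
      unfold PySem.Str.splitMax? PySem.Chars.splitMax?
      rw [hsep, if_neg (by simp), pv_splitOnMax_noocc _ _ hno]
      rfl
    rw [hA, Option.getD_some]
    rw [show PySem.List.pyGet? [String.ofList u.toList] (-1) = some (String.ofList u.toList)
      by simp [PySem.List.pyGet?, PySem.List.pyIdx?]]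
    simp [String.ofList_toList]

-- the main induction: A's fuelled recursion equals B's loop on Dom ∩ Pre_
lemma pv_main : ∀ (fA : Nat), ∀ (fB : Nat) (acct : String),
    acct.toList.length < fA →
    (pvDws (PySem.Str.strip acct).toList).length < fB →
    Dom_parse_account_name acct → pvPreL (pvDws (PySem.Str.strip acct).toList) →
    parse_account_name.go fA acct
      = parse_account_name_alt.loop fB (parse_account_name_alt.norm acct) := by
  intro fA
  induction fA with
  | zero => intro fB acct h _ _ _; omega
  | succ n ih =>
    intro fB acct hlen hB hdom hpre
    have hdomL : ∀ d ∈ acct.toList, pvDomChar d = true := by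
      unfold Dom_parse_account_name pvDomStr at hdom
      simpa [List.all_eq_true] using hdom
    have htl : (PySem.Str.strip acct).toList = PySem.Chars.strip acct.toList :=
      PySem.Str.toList_strip acct
    have hdomT : ∀ d ∈ (PySem.Str.strip acct).toList, pvDomChar d = true := by
      intro d hd
      rw [htl] at hd
      exact hdomL d ((pv_strip_sublist acct.toList).subset hd)
    simp only [parse_account_name.go]
    cases hts : (PySem.Str.strip acct).toList with
    | nil =>
      have hiF : PySem.Str.isIn "@" (PySem.Str.strip acct) = false := by
        rw [PySem.Str.isIn_eq, hts]
        decide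
      have hcondF : ¬ (¬ PySem.Str.strip acct = "" ∧
          PySem.Str.isIn "@" (PySem.Str.strip acct) = true) := by
        rintro ⟨-, h2⟩
        rw [hiF] at h2
        exact Bool.false_ne_true h2
      rw [if_neg hcondF]
      have hnorm0 : parse_account_name_alt.norm acct = "" := by
        unfold parse_account_name_alt.norm
        rw [hts]
        rfl
      rw [hnorm0]
      cases fB with
      | zero => omega
      | succ m =>
        simp only [parse_account_name_alt.loop]
        rw [if_neg (by decide)]
        decide
    | cons c r =>
      have htne : ¬ (PySem.Str.strip acct) = "" := by
        intro hh
        rw [hh] at hts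
        exact absurd hts (by simp)
      by_cases hc : c = '@'
      · -- leading '@': A drops it, B's normalization already did
        subst hc
        have hmem : '@' ∈ (PySem.Str.strip acct).toList := by rw [hts]; simp
        have hiT : PySem.Str.isIn "@" (PySem.Str.strip acct) = true := by
          rw [PySem.Str.isIn_eq, show ("@" : String).toList = ['@'] from rfl]
          exact (PySem.Chars.isIn_iff_infix _ _).mpr (pv_singleton_infix.mpr hmem)
        rw [if_pos ⟨htne, hiT⟩]
        have hsw : PySem.Str.startswith (PySem.Str.strip acct) "@" = true := by
          rw [PySem.Str.startswith_eq, hts, show ("@" : String).toList = ['@'] from rfl]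
          simp [PySem.Chars.startswith, List.isPrefixOf]
        rw [if_pos hsw]
        have hargL : (PySem.Str.slice (PySem.Str.strip acct) (some 1) none).toList = r := by
          rw [PySem.Str.toList_slice, PySem.Chars.slice_eq_listSlice,
            PySem.List.slice_from_one, hts]
          rfl
        have hdomR : ∀ d ∈ r, pvDomChar d = true := by
          intro d hd
          exact hdomT d (by rw [hts]; exact List.mem_cons_of_mem _ hd)
        have hlen' : (PySem.Str.slice (PySem.Str.strip acct) (some 1) none).toList.length < n := by
          rw [hargL]
          have h1 : (PySem.Str.strip acct).toList.length ≤ acct.toList.length := by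
            rw [htl]
            exact (pv_strip_sublist acct.toList).length_le
          rw [hts] at h1
          simp only [List.length_cons] at h1
          omega
        have hdomA : Dom_parse_account_name (PySem.Str.slice (PySem.Str.strip acct) (some 1) none) := by
          unfold Dom_parse_account_name pvDomStr
          rw [hargL]
          simpa [List.all_eq_true] using hdomR
        have hstripr : PySem.Chars.strip acct.toList = '@' :: r := by rw [← htl, hts]
        have hnorm : (PySem.Str.strip (PySem.Str.slice (PySem.Str.strip acct) (some 1) none)).toList.dropWhile
              (fun c => c ∈ ['@', ' ', '\t', '\n', '\r'])
            = (PySem.Str.strip acct).toList.dropWhile (fun c => c ∈ ['@', ' ', '\t', '\n', '\r']) := by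
          rw [PySem.Str.toList_strip, hargL,
            pv_norm_suffix acct.toList r ⟨['@'], by simp [hstripr]⟩ hdomR, hts,
            List.dropWhile_cons_of_pos (by decide)]
        have hpreA : pvPreL (pvDws (PySem.Str.strip (PySem.Str.slice (PySem.Str.strip acct) (some 1) none)).toList) := by
          show pvPreL ((PySem.Str.strip (PySem.Str.slice (PySem.Str.strip acct) (some 1) none)).toList.dropWhile _)
          rw [hnorm]
          exact hpre
        have hBA : (pvDws (PySem.Str.strip (PySem.Str.slice (PySem.Str.strip acct) (some 1) none)).toList).length < fB := by
          show ((PySem.Str.strip (PySem.Str.slice (PySem.Str.strip acct) (some 1) none)).toList.dropWhile _).length < fB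
          rw [hnorm]
          exact hB
        rw [ih fB _ hlen' hBA hdomA hpreA]
        have hnormS : parse_account_name_alt.norm (PySem.Str.slice (PySem.Str.strip acct) (some 1) none)
            = parse_account_name_alt.norm acct := by
          unfold parse_account_name_alt.norm
          exact congrArg String.ofList hnorm
        rw [hnormS]
      · -- head is neither '@' nor a space: the normalized string is strip acct itself
        have hspc : PySem.Chars.isspace c = false :=
          pv_strip_head_not_space acct.toList c r (by rw [← htl, hts])
        have hPc : ¬ (c ∈ ['@', ' ', '\t', '\n', '\r']) := pv_not_mem_set c hc hspc
        have hsP : (PySem.Str.strip acct).toList.dropWhile (fun c => c ∈ ['@', ' ', '\t', '\n', '\r'])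
            = (PySem.Str.strip acct).toList := by
          conv_lhs => rw [hts]
          rw [List.dropWhile_cons_of_neg (by simpa using hPc), ← hts]
        have hnormA : parse_account_name_alt.norm acct = PySem.Str.strip acct := by
          unfold parse_account_name_alt.norm
          rw [hsP, String.ofList_toList]
        have hpre' : pvPreL (PySem.Str.strip acct).toList := by
          have := hpre
          rw [show pvDws (PySem.Str.strip acct).toList = (PySem.Str.strip acct).toList from hsP] at this
          exact this
        have hB' : (PySem.Str.strip acct).toList.length < fB := by
          have := hB
          rw [show pvDws (PySem.Str.strip acct).toList = (PySem.Str.strip acct).toList from hsP] at this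
          exact this
        rw [hnormA]
        cases fB with
        | zero => omega
        | succ m =>
          simp only [parse_account_name_alt.loop]
          by_cases hmem : '@' ∈ (PySem.Str.strip acct).toList
          · have hiT : PySem.Str.isIn "@" (PySem.Str.strip acct) = true := by
              rw [PySem.Str.isIn_eq, show ("@" : String).toList = ['@'] from rfl]
              exact (PySem.Chars.isIn_iff_infix _ _).mpr (pv_singleton_infix.mpr hmem)
            rw [if_pos ⟨htne, hiT⟩]
            have hsw : PySem.Str.startswith (PySem.Str.strip acct) "@" = false := by
              rw [PySem.Str.startswith_eq, hts, show ("@" : String).toList = ['@'] from rfl]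
              simp [PySem.Chars.startswith, List.isPrefixOf]
              exact fun hh => hc hh.symm
            have hswn : ¬ PySem.Str.startswith (PySem.Str.strip acct) "@" = true := by
              rw [hsw]
              exact Bool.false_ne_true
            rw [if_neg hswn]
            by_cases hcnt2 : 2 ≤ (PySem.Str.strip acct).toList.count '@'
            · -- more than one '@': A jumps past the first '/@', B's loop does the same
              have hgtStr : PySem.Str.count (PySem.Str.strip acct) "@" > 1 := by
                rw [PySem.Str.count_eq, show ("@" : String).toList = ['@'] from rfl,
                  pv_count_single]
                exact_mod_cast hcnt2
              rw [if_pos hgtStr, if_pos hgtStr]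
              obtain ⟨i, hilen, hocc, htci, hmini, hbadi⟩ : ∃ i < (PySem.Str.strip acct).toList.length,
                  pvOcc (PySem.Str.strip acct).toList i ∧
                  (pvTail (PySem.Str.strip acct).toList i).count '@' ≤ 1 ∧
                  (∀ i' < i, pvOcc (PySem.Str.strip acct).toList i' →
                    2 ≤ (pvTail (PySem.Str.strip acct).toList i').count '@') ∧
                  ¬ pvBad (pvTail (PySem.Str.strip acct).toList i) := by
                rcases hpre' with ⟨h1, -⟩ | ⟨-, hw⟩
                · omega
                · exact hw
              have hinfix : ['/', '@'] <:+: (PySem.Str.strip acct).toList :=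
                List.infix_iff_prefix_suffix.mpr ⟨_, hocc, List.drop_suffix _ _⟩
              have hj0 : 0 ≤ PySem.Chars.find (PySem.Str.strip acct).toList ['/', '@'] :=
                (PySem.Chars.find_nonneg_iff _ _).mpr hinfix
              obtain ⟨heq, hlenj, hminj⟩ :=
                pv_find_decomp (PySem.Str.strip acct).toList ['/', '@'] (by simp) hj0
              simp only [List.length_cons, List.length_nil, Nat.zero_add, Nat.reduceAdd] at heq
              set f := (PySem.Chars.find (PySem.Str.strip acct).toList ['/', '@']).toNat with hf
              have hsplit : PySem.Str.splitMax? (PySem.Str.strip acct) "/@" 1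
                  = some [String.ofList ((PySem.Str.strip acct).toList.take f),
                          String.ofList ((PySem.Str.strip acct).toList.drop (f + 2))] := by
                unfold PySem.Str.splitMax? PySem.Chars.splitMax?
                rw [show ("/@" : String).toList = ['/', '@'] from rfl, if_neg (by simp)]
                rw [show PySem.Chars.splitOnMax (PySem.Str.strip acct).toList ['/', '@'] 1
                    = [(PySem.Str.strip acct).toList.take f,
                       (PySem.Str.strip acct).toList.drop (f + 2)] by
                  conv_lhs => rw [heq]
                  refine pv_splitOnMax_two ['/', '@'] _ _ (by simp) ?_
                  rw [← heq]
                  intro p hp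
                  rw [hlenj] at hp
                  exact hminj p hp]
                rfl
              rw [hsplit, Option.getD_some]
              rw [show PySem.List.pyGet?
                  [String.ofList ((PySem.Str.strip acct).toList.take f),
                   String.ofList ((PySem.Str.strip acct).toList.drop (f + 2))] (-1)
                = some (String.ofList ((PySem.Str.strip acct).toList.drop (f + 2)))
                by simp [PySem.List.pyGet?, PySem.List.pyIdx?]]
              rw [Option.getD_some]
              -- B's slice is the same string
              have hjB : PySem.Str.find (PySem.Str.strip acct) "/@" = (f : Int) := by
                rw [PySem.Str.find_eq, show ("/@" : String).toList = ['/', '@'] from rfl, hf,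
                  Int.toNat_of_nonneg hj0]
              have hjneg : ¬ PySem.Str.find (PySem.Str.strip acct) "/@" < 0 := by
                rw [hjB]
                exact not_lt.mpr (Int.natCast_nonneg f)
              rw [if_neg hjneg]
              have hslice : PySem.Str.slice (PySem.Str.strip acct)
                    (some (PySem.Str.find (PySem.Str.strip acct) "/@" + 2)) none
                  = String.ofList ((PySem.Str.strip acct).toList.drop (f + 2)) := by
                unfold PySem.Str.slice
                rw [PySem.Chars.slice_eq_listSlice, hjB,
                  show ((f : Int) + 2) = ((f + 2 : Nat) : Int) by push_cast; ring,
                  PySem.List.slice_from_natCast]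
              rw [hslice]
              -- set up the induction hypothesis on the jumped-to string
              set u := String.ofList ((PySem.Str.strip acct).toList.drop (f + 2)) with hu
              have hutl : u.toList = (PySem.Str.strip acct).toList.drop (f + 2) := by
                rw [hu, String.toList_ofList]
              have hL2 : 2 ≤ (PySem.Str.strip acct).toList.length :=
                le_trans hcnt2 (List.count_le_length)
              have hLa : (PySem.Str.strip acct).toList.length ≤ acct.toList.length := by
                rw [htl]
                exact (pv_strip_sublist acct.toList).length_le
              have hlenu : u.toList.length < n := by
                rw [hutl, List.length_drop]
                omega
              have hdomu : Dom_parse_account_name u := by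
                unfold Dom_parse_account_name pvDomStr
                rw [hutl]
                rw [List.all_eq_true]
                intro d hd
                exact hdomT d ((List.drop_suffix _ _).sublist.subset hd)
              have hnormu : (PySem.Str.strip u).toList.dropWhile
                    (fun c => c ∈ ['@', ' ', '\t', '\n', '\r'])
                  = ((PySem.Str.strip acct).toList.drop (f + 2)).dropWhile
                      (fun c => c ∈ ['@', ' ', '\t', '\n', '\r']) := by
                rw [PySem.Str.toList_strip, hutl]
                apply pv_norm_suffix acct.toList
                · rw [← htl]
                  exact List.drop_suffix _ _
                · intro d hd
                  exact hdomT d ((List.drop_suffix _ _).sublist.subset hd)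
              have hoccf : pvOcc (PySem.Str.strip acct).toList f := by
                show ['/', '@'] <+: (PySem.Str.strip acct).toList.drop f
                have hdropf : (PySem.Str.strip acct).toList.drop f
                    = ['/', '@'] ++ (PySem.Str.strip acct).toList.drop (f + 2) := by
                  conv_lhs => rw [heq]
                  rw [List.append_assoc, List.drop_left' hlenj]
                rw [hdropf]
                exact ⟨_, rfl⟩
              have hpreu : pvPreL (pvDws (PySem.Str.strip u).toList) := by
                show pvPreL ((PySem.Str.strip u).toList.dropWhile _)
                rw [hnormu]
                exact pv_pre_step (PySem.Str.strip acct).toList f hoccf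
                  (fun p hp => hminj p hp) hcnt2 hpre'
              have hBu : (pvDws (PySem.Str.strip u).toList).length < m := by
                show ((PySem.Str.strip u).toList.dropWhile _).length < m
                rw [hnormu]
                have h1 : (((PySem.Str.strip acct).toList.drop (f + 2)).dropWhile
                    (fun c => c ∈ ['@', ' ', '\t', '\n', '\r'])).length
                    ≤ ((PySem.Str.strip acct).toList.drop (f + 2)).length :=
                  (List.dropWhile_sublist _).length_le
                rw [List.length_drop] at h1
                omega
              exact ih m u hlenu hBu hdomu hpreu
            · -- exactly one '@': terminal processing
              have hcnt1 : (PySem.Str.strip acct).toList.count '@' = 1 := by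
                have h2 : 0 < (PySem.Str.strip acct).toList.count '@' := List.count_pos_iff.mpr hmem
                omega
              have hbadL : ¬ pvBad (PySem.Str.strip acct).toList := by
                rcases hpre' with ⟨-, hb⟩ | ⟨h2, -⟩
                · exact hb
                · omega
              have hcountStr : PySem.Str.count (PySem.Str.strip acct) "@" = 1 := by
                rw [PySem.Str.count_eq, show ("@" : String).toList = ['@'] from rfl,
                  pv_count_single, hcnt1]
              have hngt : ¬ PySem.Str.count (PySem.Str.strip acct) "@" > 1 := by
                rw [hcountStr]
                omega
              rw [if_neg hngt, if_neg hngt]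
              unfold parse_account_name_alt.terminal
              dsimp only
              have hat0 : 0 ≤ PySem.Str.find (PySem.Str.strip acct) "@" := by
                rw [PySem.Str.find_eq, show ("@" : String).toList = ['@'] from rfl]
                exact (PySem.Chars.find_nonneg_iff _ _).mpr (pv_singleton_infix.mpr hmem)
              rw [if_neg (not_lt.mpr hat0)]
              by_cases hhttp : PySem.Str.startswith (PySem.Str.strip acct) "http" = true
              · rw [if_pos hhttp]
                have hinfix : ['/', '@'] <:+: (PySem.Str.strip acct).toList := by
                  by_contra hno
                  refine hbadL ⟨hmem, ?_, ?_⟩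
                  · rw [PySem.Str.startswith_eq] at hhttp
                    unfold PySem.Chars.startswith at hhttp
                    exact List.isPrefixOf_iff_prefix.mp hhttp
                  · rw [show ("/@" : String).toList = ['/', '@'] from rfl]
                    exact hno
                have hj0 : 0 ≤ PySem.Chars.find (PySem.Str.strip acct).toList ['/', '@'] :=
                  (PySem.Chars.find_nonneg_iff _ _).mpr hinfix
                obtain ⟨heq, hlen2, hmin⟩ :=
                  pv_find_decomp (PySem.Str.strip acct).toList ['/', '@'] (by simp) hj0
                simp only [List.length_cons, List.length_nil, Nat.zero_add, Nat.reduceAdd] at heq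
                set f := (PySem.Chars.find (PySem.Str.strip acct).toList ['/', '@']).toNat with hf
                have hwat : '@' ∉ (PySem.Str.strip acct).toList.drop (f + 2) := by
                  intro hh
                  have hpos : 0 < List.count '@' ((PySem.Str.strip acct).toList.drop (f + 2)) :=
                    List.count_pos_iff.mpr hh
                  have hcnt := hcnt1
                  conv_lhs at hcnt => rw [heq]
                  rw [List.count_append, List.count_append,
                    show List.count '@' (['/', '@'] : List Char) = 1 from by decide] at hcnt
                  omega
                have hsplit : PySem.Str.split? (PySem.Str.strip acct) "/@"
                    = some [String.ofList ((PySem.Str.strip acct).toList.take f),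
                            String.ofList ((PySem.Str.strip acct).toList.drop (f + 2))] := by
                  unfold PySem.Str.split? PySem.Chars.split?
                  rw [show ("/@" : String).toList = ['/', '@'] from rfl, if_neg (by simp)]
                  rw [show PySem.Chars.splitOn (PySem.Str.strip acct).toList ['/', '@']
                      = [(PySem.Str.strip acct).toList.take f,
                         (PySem.Str.strip acct).toList.drop (f + 2)] by
                    conv_lhs => rw [heq]
                    refine pv_splitOn_two ['/', '@'] _ _ (by simp) ?_ ?_
                    · rw [← heq]
                      intro i hi
                      rw [hlen2] at hi
                      exact hmin i hi
                    · intro hh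
                      exact hwat (hh.mem (by simp))]
                  rfl
                rw [hsplit, Option.getD_some]
                dsimp only
                rw [pv_first_chunk, pv_after_sep, pv_first_chunk]
                have hjB : PySem.Str.find (PySem.Str.strip acct) "/@" = (f : Int) := by
                  rw [PySem.Str.find_eq, show ("/@" : String).toList = ['/', '@'] from rfl, hf,
                    Int.toNat_of_nonneg hj0]
                have hBcond : PySem.Str.startswith (PySem.Str.strip acct) "http" = true ∧
                    PySem.Str.find (PySem.Str.strip acct) "/@" ≥ 0 := by
                  refine ⟨hhttp, ?_⟩
                  rw [hjB]
                  exact Int.natCast_nonneg f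
                rw [if_pos hBcond]
                have hun0 : PySem.Str.slice (PySem.Str.strip acct)
                      (some (PySem.Str.find (PySem.Str.strip acct) "/@" + 2)) none
                    = String.ofList ((PySem.Str.strip acct).toList.drop (f + 2)) := by
                  unfold PySem.Str.slice
                  rw [PySem.Chars.slice_eq_listSlice, hjB,
                    show ((f : Int) + 2) = ((f + 2 : Nat) : Int) by push_cast; ring,
                    PySem.List.slice_from_natCast]
                have hhead : PySem.Str.slice (PySem.Str.strip acct) none
                      (some (PySem.Str.find (PySem.Str.strip acct) "/@"))
                    = String.ofList ((PySem.Str.strip acct).toList.take f) := by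
                  unfold PySem.Str.slice
                  rw [PySem.Chars.slice_eq_listSlice, hjB, PySem.List.slice_to_natCast]
                rw [hun0, hhead]
              · rw [if_neg hhttp, if_pos hcountStr]
                have hat0' : 0 ≤ PySem.Chars.find (PySem.Str.strip acct).toList ['@'] := by
                  rw [show (['@'] : List Char) = ("@" : String).toList from rfl, ← PySem.Str.find_eq]
                  exact hat0
                obtain ⟨heq, hlen2, hmin⟩ :=
                  pv_find_decomp (PySem.Str.strip acct).toList ['@'] (by simp) hat0'
                simp only [List.length_cons, List.length_nil, Nat.zero_add] at heq
                set f := (PySem.Chars.find (PySem.Str.strip acct).toList ['@']).toNat with hf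
                have hsplit : PySem.Str.splitMax? (PySem.Str.strip acct) "@" 1
                    = some [String.ofList ((PySem.Str.strip acct).toList.take f),
                            String.ofList ((PySem.Str.strip acct).toList.drop (f + 1))] := by
                  unfold PySem.Str.splitMax? PySem.Chars.splitMax?
                  rw [show ("@" : String).toList = ['@'] from rfl, if_neg (by simp)]
                  rw [show PySem.Chars.splitOnMax (PySem.Str.strip acct).toList ['@'] 1
                      = [(PySem.Str.strip acct).toList.take f,
                         (PySem.Str.strip acct).toList.drop (f + 1)] by
                    conv_lhs => rw [heq]
                    refine pv_splitOnMax_two ['@'] _ _ (by simp) ?_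
                    rw [← heq]
                    intro i hi
                    rw [hlen2] at hi
                    exact hmin i hi]
                  rfl
                rw [hsplit, Option.getD_some]
                dsimp only
                rw [pv_first_chunk]
                have hatB : PySem.Str.find (PySem.Str.strip acct) "@" = (f : Int) := by
                  rw [PySem.Str.find_eq, show ("@" : String).toList = ['@'] from rfl, hf,
                    Int.toNat_of_nonneg hat0']
                have hBneg : ¬ (PySem.Str.startswith (PySem.Str.strip acct) "http" = true ∧
                    PySem.Str.find (PySem.Str.strip acct) "/@" ≥ 0) := fun hcond => hhttp hcond.1
                rw [if_neg hBneg]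
                have hun : PySem.Str.slice (PySem.Str.strip acct) none
                      (some (PySem.Str.find (PySem.Str.strip acct) "@"))
                    = String.ofList ((PySem.Str.strip acct).toList.take f) := by
                  unfold PySem.Str.slice
                  rw [PySem.Chars.slice_eq_listSlice, hatB, PySem.List.slice_to_natCast]
                have hserver0 : PySem.Str.slice (PySem.Str.strip acct)
                      (some (PySem.Str.find (PySem.Str.strip acct) "@" + 1)) none
                    = String.ofList ((PySem.Str.strip acct).toList.drop (f + 1)) := by
                  unfold PySem.Str.slice
                  rw [PySem.Chars.slice_eq_listSlice, hatB,
                    show ((f : Int) + 1) = ((f + 1 : Nat) : Int) by push_cast; ring,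
                    PySem.List.slice_from_natCast]
                rw [hun, hserver0]
          · -- no '@' anywhere: both return ("","")
            have hiF : PySem.Str.isIn "@" (PySem.Str.strip acct) = false := by
              rw [PySem.Str.isIn_eq, show ("@" : String).toList = ['@'] from rfl,
                PySem.Chars.isIn_eq_false_iff]
              exact fun hh => hmem (pv_singleton_infix.mp hh)
            have hcondF : ¬ (¬ PySem.Str.strip acct = "" ∧
                PySem.Str.isIn "@" (PySem.Str.strip acct) = true) := by
              rintro ⟨-, h2⟩
              rw [hiF] at h2
              exact Bool.false_ne_true h2
            rw [if_neg hcondF]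
            have hcnt0 : (PySem.Str.strip acct).toList.count '@' = 0 :=
              List.count_eq_zero.mpr hmem
            have hngt : ¬ PySem.Str.count (PySem.Str.strip acct) "@" > 1 := by
              rw [PySem.Str.count_eq, show ("@" : String).toList = ['@'] from rfl,
                pv_count_single, hcnt0]
              decide
            rw [if_neg hngt]
            unfold parse_account_name_alt.terminal
            dsimp only
            have hfind : PySem.Str.find (PySem.Str.strip acct) "@" = -1 := by
              rw [PySem.Str.find_eq, show ("@" : String).toList = ['@'] from rfl]
              apply (PySem.Chars.find_eq_neg_one_iff _ _).mpr
              intro hh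
              exact hmem (pv_singleton_infix.mp hh)
            rw [hfind]
            norm_num

-- ===== VERDICT (by name: the statement is the Claim_ definition above) =====
theorem parse_account_name_spec : Claim_equal_parse_account_name := by
  intro acct hdom hpre
  unfold Spec_parse_account_name parse_account_name parse_account_name_alt
  apply pv_main _ _ acct (Nat.lt_succ_self _) _ hdom hpre
  have h1 : (pvDws (PySem.Str.strip acct).toList).length ≤ (PySem.Str.strip acct).toList.length :=
    (List.dropWhile_sublist _).length_le
  have h2 : (PySem.Str.strip acct).toList.length ≤ acct.toList.length := by
    rw [PySem.Str.toList_strip]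
    exact (pv_strip_sublist acct.toList).length_le
  omega
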